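-- pv_equiv track=rewrite | github.com/krzyssikora/matrices | utils.py | get_ids_before_and_after_in_dict
-- ===== SOURCE A (Python) =====
-- def get_ids_before_and_after_in_dict(the_dict, idx):
--     """
--     Args:
--         the_dict: its keys must be numbers
--         idx: index to refer to
--     Returns:
--         largest key before and smallest after (or None-s)
--     """
--     i = 0
--     left_idx, right_idx = None, None
--     keys = list(the_dict)
--     keys.sort()
--     while True:
--         if i >= len(keys):
--             break
--         if keys[i] > idx:
--             if i > 0:
--                 left_idx, right_idx = keys[i - 1], keys[i]
--             break
--         i += 1
--
--     return left_idx, right_idx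
-- ===== SOURCE B (Python) =====
-- def get_ids_before_and_after_in_dict(the_dict, idx):
--     """Single linear pass: track the largest key <= idx and the smallest key > idx."""
--     left, right = None, None
--     for key in the_dict:
--         if key <= idx:
--             if left is None or key > left:
--                 left = key
--         else:
--             if right is None or key < right:
--                 right = key
--     if left is None or right is None:
--         return None, None
--     return left, right
-- ===== Notes on version B (the rewrite author's own statement) =====
-- stated objective: faster
-- what changed: replaces sort-then-scan-for-first-key-greater-than-idx by a single unsorted linear pass maintaining the running max of keys <= idx and the running min of keys > idx, returning the pair only when both exist (as A does)
import Mathlib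
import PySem

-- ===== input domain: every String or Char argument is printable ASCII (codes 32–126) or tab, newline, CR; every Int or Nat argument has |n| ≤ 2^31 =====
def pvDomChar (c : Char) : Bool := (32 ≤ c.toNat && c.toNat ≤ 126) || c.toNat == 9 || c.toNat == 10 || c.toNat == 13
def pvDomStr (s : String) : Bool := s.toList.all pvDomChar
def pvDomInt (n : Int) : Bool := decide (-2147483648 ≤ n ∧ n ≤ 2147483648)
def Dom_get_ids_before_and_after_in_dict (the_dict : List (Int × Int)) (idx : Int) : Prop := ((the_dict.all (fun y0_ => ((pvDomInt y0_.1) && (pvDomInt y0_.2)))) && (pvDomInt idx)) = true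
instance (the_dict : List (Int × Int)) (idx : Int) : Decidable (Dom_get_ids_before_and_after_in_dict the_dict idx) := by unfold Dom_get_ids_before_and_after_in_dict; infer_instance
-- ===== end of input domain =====

-- B replaces A's sort-then-scan by a single unsorted pass tracking the max key ≤ idx and the min key > idx (measured faster in a timing run).


-- ===== PORT A =====
-- the 'while True' loop of A: index i over the sorted key list
def pvALoop (keys : List Int) (idx : Int) (i : Nat) : Option Int × Option Int :=
  if _h : keys.length ≤ i then (none, none)
  else if keys.getD i 0 > idx then
    if 0 < i then (some (keys.getD (i - 1) 0), some (keys.getD i 0)) else (none, none)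
  else pvALoop keys idx (i + 1)
termination_by keys.length - i
decreasing_by omega

def get_ids_before_and_after_in_dict (the_dict : List (Int × Int)) (idx : Int) : Option Int × Option Int :=
  -- keys = list(the_dict): the keys of the dict, first occurrences in insertion order; then keys.sort()
  let keys := PySem.List.sorted (PySem.List.dedup (the_dict.map Prod.fst)) (fun x => x) false
  pvALoop keys idx 0

-- ===== PORT B =====
-- one step of B's single pass: update running max of keys ≤ idx / running min of keys > idx
def pvBStep (idx : Int) (acc : Option Int × Option Int) (key : Int) : Option Int × Option Int :=
  if key ≤ idx then
    match acc.1 with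
    | none => (some key, acc.2)
    | some m => if key > m then (some key, acc.2) else acc
  else
    match acc.2 with
    | none => (acc.1, some key)
    | some m => if key < m then (acc.1, some key) else acc

def get_ids_before_and_after_in_dict_alt (the_dict : List (Int × Int)) (idx : Int) : Option Int × Option Int :=
  -- 'for key in the_dict' iterates the dict's keys (first occurrences, insertion order)
  match (PySem.List.dedup (the_dict.map Prod.fst)).foldl (pvBStep idx) (none, none) with
  | (some l, some r) => (some l, some r)
  | _ => (none, none)

-- ===== PRECONDITION & SPEC =====
def Spec_get_ids_before_and_after_in_dict (the_dict : List (Int × Int)) (idx : Int) (out : Option Int × Option Int) : Prop := out = get_ids_before_and_after_in_dict_alt the_dict idx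
instance (the_dict : List (Int × Int)) (idx : Int) (out : Option Int × Option Int) : Decidable (Spec_get_ids_before_and_after_in_dict the_dict idx out) := by unfold Spec_get_ids_before_and_after_in_dict; infer_instance

-- ===== CLAIM (what is proved, stated in full; the proofs are below) =====
def Claim_equal_get_ids_before_and_after_in_dict : Prop := ∀ (the_dict : List (Int × Int)) (idx : Int), Dom_get_ids_before_and_after_in_dict the_dict idx → Spec_get_ids_before_and_after_in_dict the_dict idx (get_ids_before_and_after_in_dict the_dict idx)

-- ===== LEMMAS AND PROOFS =====

-- the canonical value both programs compute: (max key ≤ idx, min key > idx), or (none, none) if either is missing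
def pvCombine (a b : Option Int) : Option Int × Option Int :=
  match a, b with
  | some x, some y => (some x, some y)
  | _, _ => (none, none)

def pvOMax (a : Option Int) (k : Int) : Option Int :=
  match a with | none => some k | some m => some (max m k)

def pvOMin (a : Option Int) (k : Int) : Option Int :=
  match a with | none => some k | some m => some (min m k)

theorem pvBStep_eq (idx : Int) (acc : Option Int × Option Int) (k : Int) :
    pvBStep idx acc k =
      (if k ≤ idx then pvOMax acc.1 k else acc.1,
       if k ≤ idx then acc.2 else pvOMin acc.2 k) := by
  obtain ⟨l, r⟩ := acc
  simp only [pvBStep, pvOMax, pvOMin]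
  by_cases h : k ≤ idx <;> cases l <;> cases r <;> simp [h] <;> split_ifs <;> simp <;> omega

theorem foldl_pvBStep (idx : Int) (ks : List Int) : ∀ l r : Option Int,
    ks.foldl (pvBStep idx) (l, r) =
      ((ks.filter (fun k => k ≤ idx)).foldl pvOMax l,
       (ks.filter (fun k => idx < k)).foldl pvOMin r) := by
  induction ks with
  | nil => intro l r; simp
  | cons k t ih =>
    intro l r
    rw [List.foldl_cons, pvBStep_eq]
    by_cases h : k ≤ idx
    · simp [h, not_lt.mpr h, ih]
    · simp [h, lt_of_not_ge h, ih]

theorem foldl_pvOMax_some (t : List Int) : ∀ m : Int, t.foldl pvOMax (some m) = some (t.foldl max m) := by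
  induction t with
  | nil => intro m; rfl
  | cons a t ih => intro m; simp [List.foldl_cons, pvOMax, ih]

theorem foldl_pvOMin_some (t : List Int) : ∀ m : Int, t.foldl pvOMin (some m) = some (t.foldl min m) := by
  induction t with
  | nil => intro m; rfl
  | cons a t ih => intro m; simp [List.foldl_cons, pvOMin, ih]

theorem foldl_pvOMax_none (l : List Int) : l.foldl pvOMax none = l.max? := by
  cases l with
  | nil => rfl
  | cons a t =>
    rw [List.foldl_cons, show pvOMax none a = some a from rfl, foldl_pvOMax_some,
      show (a :: t).max? = some (t.foldl max a) from rfl]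

theorem foldl_pvOMin_none (l : List Int) : l.foldl pvOMin none = l.min? := by
  cases l with
  | nil => rfl
  | cons a t =>
    rw [List.foldl_cons, show pvOMin none a = some a from rfl, foldl_pvOMin_some,
      show (a :: t).min? = some (t.foldl min a) from rfl]

-- B computes pvCombine of max?/min? of the filtered key list
theorem alt_eq_combine (the_dict : List (Int × Int)) (idx : Int) :
    get_ids_before_and_after_in_dict_alt the_dict idx =
      pvCombine ((PySem.List.dedup (the_dict.map Prod.fst)).filter (fun k => k ≤ idx) |>.max?)
                ((PySem.List.dedup (the_dict.map Prod.fst)).filter (fun k => idx < k) |>.min?) := by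
  unfold get_ids_before_and_after_in_dict_alt pvCombine
  rw [foldl_pvBStep, foldl_pvOMax_none, foldl_pvOMin_none]
  cases ((PySem.List.dedup (the_dict.map Prod.fst)).filter (fun k => k ≤ idx)).max? <;>
    cases ((PySem.List.dedup (the_dict.map Prod.fst)).filter (fun k => idx < k)).min? <;> rfl

-- max?/min? of a filtered list depend only on which elements are in the list
theorem max?_filter_congr (p : Int → Bool) (l₁ l₂ : List Int) (hm : ∀ x, x ∈ l₁ ↔ x ∈ l₂) :
    (l₁.filter p).max? = (l₂.filter p).max? := by
  have hm' : ∀ x, x ∈ l₁.filter p ↔ x ∈ l₂.filter p := by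
    intro x; simp [List.mem_filter, hm]
  cases h : (l₂.filter p).max? with
  | none =>
    rw [List.max?_eq_none_iff] at h
    rw [List.max?_eq_none_iff, List.eq_nil_iff_forall_not_mem]
    intro x hx
    exact (List.eq_nil_iff_forall_not_mem.1 h) x ((hm' x).1 hx)
  | some m =>
    rw [List.max?_eq_some_iff] at h
    rw [List.max?_eq_some_iff]
    exact ⟨(hm' m).2 h.1, fun b hb => h.2 b ((hm' b).1 hb)⟩

theorem min?_filter_congr (p : Int → Bool) (l₁ l₂ : List Int) (hm : ∀ x, x ∈ l₁ ↔ x ∈ l₂) :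
    (l₁.filter p).min? = (l₂.filter p).min? := by
  have hm' : ∀ x, x ∈ l₁.filter p ↔ x ∈ l₂.filter p := by
    intro x; simp [List.mem_filter, hm]
  cases h : (l₂.filter p).min? with
  | none =>
    rw [List.min?_eq_none_iff] at h
    rw [List.min?_eq_none_iff, List.eq_nil_iff_forall_not_mem]
    intro x hx
    exact (List.eq_nil_iff_forall_not_mem.1 h) x ((hm' x).1 hx)
  | some m =>
    rw [List.min?_eq_some_iff] at h
    rw [List.min?_eq_some_iff]
    exact ⟨(hm' m).2 h.1, fun b hb => h.2 b ((hm' b).1 hb)⟩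

-- A's loop on a ≤-sorted list computes the same canonical value
theorem pvCombine_none_right (a : Option Int) : pvCombine a none = (none, none) := by
  cases a <;> rfl

theorem pvCombine_none_left (b : Option Int) : pvCombine none b = (none, none) := by
  cases b <;> rfl

theorem pvALoop_spec (s : List Int) (idx : Int) (hs : s.Pairwise (· ≤ ·)) :
    ∀ n i : Nat, s.length - i ≤ n → (∀ j : Nat, (hj : j < s.length) → j < i → s[j] ≤ idx) →
      pvALoop s idx i =
        pvCombine ((s.filter (fun k => k ≤ idx)).max?) ((s.filter (fun k => idx < k)).min?) := by
  have hpair := List.pairwise_iff_getElem.1 hs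
  have hmono : ∀ (p q : Nat) (hp : p < s.length) (hq : q < s.length), p ≤ q → s[p] ≤ s[q] := by
    intro p q hp hq hpq
    rcases Nat.eq_or_lt_of_le hpq with h | h
    · subst h; exact le_refl _
    · exact hpair p q hp hq h
  have hdone : ∀ i : Nat, s.length ≤ i → (∀ j : Nat, (hj : j < s.length) → j < i → s[j] ≤ idx) →
      (none, none) = pvCombine ((s.filter (fun k => k ≤ idx)).max?) ((s.filter (fun k => idx < k)).min?) := by
    intro i hlen hbelow
    have hfil : s.filter (fun k => idx < k) = [] := by
      rw [List.filter_eq_nil_iff]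
      intro x hx
      obtain ⟨j, hj, rfl⟩ := List.mem_iff_getElem.1 hx
      simpa using not_lt.mpr (hbelow j hj (by omega))
    rw [hfil]
    exact (pvCombine_none_right _).symm
  intro n
  induction n with
  | zero =>
    intro i hn hbelow
    rw [pvALoop, dif_pos (by omega : s.length ≤ i)]
    exact hdone i (by omega) hbelow
  | succ n ih =>
    intro i hn hbelow
    rw [pvALoop]
    by_cases hlen : s.length ≤ i
    · rw [dif_pos hlen]
      exact hdone i hlen hbelow
    · rw [dif_neg hlen]
      have hi : i < s.length := by omega
      rw [List.getD_eq_getElem s 0 hi]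
      by_cases hk : idx < s[i]
      · rw [if_pos hk]
        by_cases hi0 : 0 < i
        · rw [if_pos hi0]
          have hi1 : i - 1 < s.length := by omega
          rw [List.getD_eq_getElem s 0 hi1]
          have hmax : (s.filter (fun k => k ≤ idx)).max? = some s[i - 1] := by
            rw [List.max?_eq_some_iff]
            constructor
            · exact List.mem_filter.2 ⟨List.getElem_mem hi1, by
                simpa using hbelow (i - 1) hi1 (by omega)⟩
            · intro b hb
              obtain ⟨hbs, hble⟩ := List.mem_filter.1 hb
              obtain ⟨j, hj, rfl⟩ := List.mem_iff_getElem.1 hbs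
              by_cases hji : j < i
              · exact hmono j (i - 1) hj hi1 (by omega)
              · exfalso
                have h1 : s[i] ≤ s[j] := hmono i j hi hj (by omega)
                simp at hble
                omega
          have hmin : (s.filter (fun k => idx < k)).min? = some s[i] := by
            rw [List.min?_eq_some_iff]
            constructor
            · exact List.mem_filter.2 ⟨List.getElem_mem hi, by simpa using hk⟩
            · intro b hb
              obtain ⟨hbs, hbgt⟩ := List.mem_filter.1 hb
              obtain ⟨j, hj, rfl⟩ := List.mem_iff_getElem.1 hbs
              by_cases hji : j < i
              · exfalso
                have := hbelow j hj hji
                simp at hbgt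
                omega
              · exact hmono i j hi hj (by omega)
          rw [hmax, hmin]
          rfl
        · rw [if_neg hi0]
          have hfil : s.filter (fun k => k ≤ idx) = [] := by
            rw [List.filter_eq_nil_iff]
            intro x hx
            obtain ⟨j, hj, rfl⟩ := List.mem_iff_getElem.1 hx
            have h1 : s[i] ≤ s[j] := hmono i j hi hj (by omega)
            simp
            omega
          rw [hfil]
          exact (pvCombine_none_left _).symm
      · rw [if_neg hk]
        exact ih (i + 1) (by omega) (fun j hj hji => by
          rcases Nat.lt_or_ge j i with h' | h'
          · exact hbelow j hj h'
          · have hji' : j = i := by omega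
            subst hji'
            exact not_lt.1 hk)

-- ===== VERDICT (by name: the statement is the Claim_ definition above) =====
theorem get_ids_before_and_after_in_dict_spec : Claim_equal_get_ids_before_and_after_in_dict := by
  intro the_dict idx _hdom
  unfold Spec_get_ids_before_and_after_in_dict
  unfold get_ids_before_and_after_in_dict
  have hs : (PySem.List.sorted (PySem.List.dedup (the_dict.map Prod.fst)) (fun x => x) false).Pairwise (· ≤ ·) :=
    PySem.List.sorted_pairwise _ _
  rw [pvALoop_spec _ idx hs _ 0 (le_refl _) (by omega), alt_eq_combine]
  have hmem : ∀ x : Int, x ∈ PySem.List.sorted (PySem.List.dedup (the_dict.map Prod.fst)) (fun x => x) false ↔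
      x ∈ PySem.List.dedup (the_dict.map Prod.fst) := fun x => PySem.List.mem_sorted _ _ _ x
  rw [max?_filter_congr _ _ _ hmem, min?_filter_congr _ _ _ hmem]
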